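-- pv_equiv track=rewrite | github.com/jchen-BUlab/LLM_NLP_dataharmonization | code/Grid_search_and_evaluation_50_trials.py | split_into_sublists
-- ===== SOURCE A (Python) =====
-- def split_into_sublists(lst, k):
--     """
--     Split a list into k sublists without overlapping.
--
--     Parameters:
--     - lst: List to be split.
--     - k: Number of sublists.
--
--     Returns:
--     A list of k sublists.
--     """
--     n = len(lst)
--     sublist_size = n // k
--     remainder = n % k
--
--     sublists = []
--     start = 0
--
--     for i in range(k):
--         sublist_length = sublist_size + (1 if i < remainder else 0)
--         sublists.append(lst[start:start + sublist_length])
--         start += sublist_length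
--
--     return sublists
-- ===== SOURCE B (Python) =====
-- def split_into_sublists(lst, k):
--     n = len(lst)
--     q, r = divmod(n, k)
--     cut = r * (q + 1)
--     buckets = [[] for _ in range(k)]
--     for j, x in enumerate(lst):
--         c = j // (q + 1) if j < cut else r + (j - cut) // q
--         buckets[c].append(x)
--     return buckets
-- ===== Notes on version B (the rewrite author's own statement) =====
-- stated objective: alternative
-- what changed: B inverts the mapping: instead of A's sequential slicing with a running start, it allocates k empty buckets and makes one pass over the elements, computing each element's destination bucket from its index by closed-form division and appending it there.
-- outside the precondition, e.g. on split_into_sublists([1], -1): A returns [], B raises IndexError; on split_into_sublists([1, 2], 0): A raises ZeroDivisionError, B raises ZeroDivisionError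
import Mathlib
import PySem

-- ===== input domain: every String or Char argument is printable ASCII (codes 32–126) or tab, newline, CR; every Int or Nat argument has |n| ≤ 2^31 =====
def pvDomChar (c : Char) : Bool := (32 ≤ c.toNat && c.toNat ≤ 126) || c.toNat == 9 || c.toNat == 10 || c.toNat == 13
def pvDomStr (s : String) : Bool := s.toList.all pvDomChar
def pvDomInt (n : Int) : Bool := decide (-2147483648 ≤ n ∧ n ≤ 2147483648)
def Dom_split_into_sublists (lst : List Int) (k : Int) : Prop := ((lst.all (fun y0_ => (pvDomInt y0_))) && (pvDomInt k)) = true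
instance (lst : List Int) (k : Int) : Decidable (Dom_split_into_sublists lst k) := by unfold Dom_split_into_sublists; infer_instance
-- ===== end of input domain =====

-- B replaces A's sequential chunk-slicing loop by the inverse mapping: one pass over the
-- elements, scattering each into the bucket computed from its index by closed-form division
-- (alternative algorithm, same cost). Equivalence is about the return value only.


-- ===== PORT A =====
def split_into_sublists (lst : List Int) (k : Int) : List (List Int) :=
  let n : Int := lst.length
  let sublist_size : Int := PySem.Int.floordiv n k
  let remainder : Int := PySem.Int.mod n k
  ((PySem.List.pyRange 0 k 1).foldl
    (fun (st : List (List Int) × Int) i =>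
      let sublist_length : Int := sublist_size + (if i < remainder then 1 else 0)
      (st.1 ++ [PySem.List.slice lst (some st.2) (some (st.2 + sublist_length))],
       st.2 + sublist_length))
    ([], 0)).1

-- ===== PORT B =====
def split_into_sublists_alt (lst : List Int) (k : Int) : List (List Int) :=
  let n : Int := lst.length
  let q : Int := PySem.Int.floordiv n k
  let r : Int := PySem.Int.mod n k
  let cut : Int := r * (q + 1)
  let buckets : List (List Int) := (PySem.List.pyRange 0 k 1).map (fun _ => ([] : List Int))
  (PySem.List.enumerate lst 0).foldl
    (fun bs jx =>
      let c : Int := if jx.1 < cut then PySem.Int.floordiv jx.1 (q + 1)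
                     else r + PySem.Int.floordiv (jx.1 - cut) q
      -- buckets[c].append(x): functional update; exact for the in-range c that Pre_ guarantees
      PySem.List.pySetD bs c (PySem.List.pyGetD bs c [] ++ [jx.2]))
    buckets

-- ===== PRECONDITION & SPEC =====
-- Pre_ excludes k = 0, where both programs raise ZeroDivisionError, and negative k with a
-- nonempty list, where A returns [] (its loop never runs) but B's bucket indexing raises
-- IndexError; the empty list with negative k (both return []) stays inside.
def Pre_split_into_sublists (lst : List Int) (k : Int) : Prop := 0 < k ∨ (lst = [] ∧ k < 0)
instance (lst : List Int) (k : Int) : Decidable (Pre_split_into_sublists lst k) := by unfold Pre_split_into_sublists; infer_instance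
def pvWitness_split_into_sublists : List Int × Int := ([1, 2, 3, 4, 5], 2)

def Spec_split_into_sublists (lst : List Int) (k : Int) (out : List (List Int)) : Prop := out = split_into_sublists_alt lst k
instance (lst : List Int) (k : Int) (out : List (List Int)) : Decidable (Spec_split_into_sublists lst k out) := by unfold Spec_split_into_sublists; infer_instance

-- ===== CLAIM (what is proved, stated in full; the proofs are below) =====
def Claim_equal_split_into_sublists : Prop := ∀ (lst : List Int) (k : Int), Dom_split_into_sublists lst k → Pre_split_into_sublists lst k → Spec_split_into_sublists lst k (split_into_sublists lst k)

-- ===== LEMMAS AND PROOFS =====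
-- Nat-level boundary of chunk i: the first r chunks are one longer.
def pvBnd (nq nr : Nat) (i : Nat) : Nat := i * nq + min i nr

-- Bucket index of the element at position m (Nat version of B's per-element formula).
def pvC (nq nr : Nat) (m : Nat) : Nat :=
  if m < nr * (nq + 1) then m / (nq + 1) else nr + (m - nr * (nq + 1)) / nq

-- The canonical result both ports are reduced to: chunk i is lst[pvBnd i : pvBnd (i+1)].
def pvChunks (lst : List Int) (nq nr nk : Nat) : List (List Int) :=
  (List.range nk).map (fun i => (lst.drop (pvBnd nq nr i)).take (pvBnd nq nr (i + 1) - pvBnd nq nr i))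

theorem pvC_spec (nq nr nk m : Nat) (hrk : nr < nk) (hm : m < nq * nk + nr) :
    pvC nq nr m < nk ∧ pvBnd nq nr (pvC nq nr m) ≤ m ∧ m < pvBnd nq nr (pvC nq nr m + 1) := by
  unfold pvC pvBnd
  split_ifs with hcut
  · set c := m / (nq + 1) with hcdef
    have he1 : (nq + 1) * c + m % (nq + 1) = m := Nat.div_add_mod m (nq + 1)
    have he2 : m % (nq + 1) < nq + 1 := Nat.mod_lt _ (by omega)
    have hc : c < nr := Nat.div_lt_of_lt_mul (Nat.mul_comm nr (nq + 1) ▸ hcut)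
    have hr1 : (nq + 1) * c = c * nq + c := by ring
    have hr2 : (c + 1) * nq + (c + 1) = (nq + 1) * c + (nq + 1) := by ring
    have hmin1 : min c nr = c := Nat.min_eq_left hc.le
    have hmin2 : min (c + 1) nr = c + 1 := Nat.min_eq_left hc
    refine ⟨by omega, ?_, ?_⟩
    · rw [hmin1]; linarith [Nat.zero_le (m % (nq + 1))]
    · rw [hmin2]; linarith
  · have hge : nr * (nq + 1) ≤ m := by omega
    rcases Nat.eq_zero_or_pos nq with h0 | hpos
    · subst h0; omega
    obtain ⟨t, ht⟩ : ∃ t, m = nr * (nq + 1) + t := ⟨m - nr * (nq + 1), by omega⟩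
    have hsimp : m - nr * (nq + 1) = t := by omega
    rw [hsimp]
    obtain ⟨d, e, hde, helt⟩ : ∃ d e, t = nq * d + e ∧ e < nq :=
      ⟨t / nq, t % nq, (Nat.div_add_mod t nq).symm, Nat.mod_lt _ hpos⟩
    have hdiv : t / nq = d := by
      rw [hde, Nat.mul_add_div hpos, Nat.div_eq_of_lt helt, Nat.add_zero]
    rw [hdiv]
    have hid1 : nr * (nq + 1) = nr * nq + nr := by ring
    have hck : nr + d < nk := by
      have hmul : nq * (nr + d) = nr * nq + nq * d := by ring
      have hlt : nq * (nr + d) < nq * nk := by linarith [Nat.zero_le e]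
      exact Nat.lt_of_mul_lt_mul_left hlt
    have hmin1 : min (nr + d) nr = nr := Nat.min_eq_right (by omega)
    have hmin2 : min (nr + d + 1) nr = nr := Nat.min_eq_right (by omega)
    refine ⟨hck, ?_, ?_⟩
    · rw [hmin1]
      have h3 : (nr + d) * nq = nr * nq + nq * d := by ring
      linarith [Nat.zero_le e]
    · rw [hmin2]
      have h4 : (nr + d + 1) * nq = nr * nq + nq * d + nq := by ring
      linarith

theorem pvBnd_mono (nq nr : Nat) {i j : Nat} (h : i ≤ j) : pvBnd nq nr i ≤ pvBnd nq nr j := by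
  unfold pvBnd
  have h1 := Nat.mul_le_mul_right nq h
  have h2 : min i nr ≤ min j nr := by omega
  omega

theorem pvC_int (nq nr m : Nat) :
    (if (m : Int) < (nr : Int) * ((nq : Int) + 1)
     then PySem.Int.floordiv (m : Int) ((nq : Int) + 1)
     else (nr : Int) + PySem.Int.floordiv ((m : Int) - (nr : Int) * ((nq : Int) + 1)) (nq : Int))
    = ((pvC nq nr m : Nat) : Int) := by
  have hcast : ((nr : Int) * ((nq : Int) + 1)) = ((nr * (nq + 1) : Nat) : Int) := by push_cast; ring
  have hcast2 : ((nq : Int) + 1) = ((nq + 1 : Nat) : Int) := by push_cast; ring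
  rw [hcast, hcast2]
  unfold pvC
  by_cases h : m < nr * (nq + 1)
  · rw [if_pos (by exact_mod_cast h), if_pos h, PySem.Int.floordiv_natCast]
  · rw [if_neg (by exact_mod_cast h), if_neg h,
      show ((m : Int) - ((nr * (nq + 1) : Nat) : Int)) = ((m - nr * (nq + 1) : Nat) : Int) from
        (by rw [Nat.cast_sub (Nat.not_lt.mp h)]),
      PySem.Int.floordiv_natCast]
    push_cast; ring

theorem scatter_loop (lst : List Int) (nq nr nk : Nat)
    (hlen : lst.length = nq * nk + nr) (hrk : nr < nk) :
    ∀ m : Nat, m ≤ lst.length →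
      (PySem.List.enumerate (lst.take m) 0).foldl
        (fun bs jx =>
          PySem.List.pySetD bs
            (if jx.1 < (nr : Int) * ((nq : Int) + 1)
             then PySem.Int.floordiv jx.1 ((nq : Int) + 1)
             else (nr : Int) + PySem.Int.floordiv (jx.1 - (nr : Int) * ((nq : Int) + 1)) (nq : Int))
            (PySem.List.pyGetD bs
              (if jx.1 < (nr : Int) * ((nq : Int) + 1)
               then PySem.Int.floordiv jx.1 ((nq : Int) + 1)
               else (nr : Int) + PySem.Int.floordiv (jx.1 - (nr : Int) * ((nq : Int) + 1)) (nq : Int)) []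
             ++ [jx.2]))
        ((List.range nk).map (fun _ => ([] : List Int)))
      = (List.range nk).map
          (fun i => (lst.drop (pvBnd nq nr i)).take
              (min (pvBnd nq nr (i + 1) - pvBnd nq nr i) (m - pvBnd nq nr i))) := by
  intro m
  induction m with
  | zero =>
    intro _
    simp only [List.take_zero, PySem.List.enumerate_nil, List.foldl_nil]
    apply List.map_congr_left
    intro i _
    simp
  | succ m ih =>
    intro hm1
    have hm : m < lst.length := by omega
    rw [List.take_add_one, List.getElem?_eq_getElem hm]
    simp only [Option.toList_some]
    rw [PySem.List.enumerate_append, List.foldl_append, ih (le_of_lt hm)]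
    simp only [List.length_take_of_le (le_of_lt hm), PySem.List.enumerate_cons,
      PySem.List.enumerate_nil, List.foldl_cons, List.foldl_nil, Int.zero_add]
    rw [pvC_int nq nr m]
    obtain ⟨hck, hlo, hhi⟩ := pvC_spec nq nr nk m hrk (by omega)
    set i0 := pvC nq nr m with hi0
    rw [PySem.List.pyGetD_natCast, PySem.List.getD_map_range _ _ _ _ hck,
      PySem.List.pySetD_natCast]
    apply List.ext_getElem
    · simp
    · intro j hj1 hj2
      simp only [List.length_set, List.length_map, List.length_range] at hj1
      rw [List.getElem_set]
      simp only [List.getElem_map, List.getElem_range]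
      by_cases hji : i0 = j
      · subst hji
        rw [if_pos rfl]
        have hmin1 : min (pvBnd nq nr (i0 + 1) - pvBnd nq nr i0) (m - pvBnd nq nr i0)
            = m - pvBnd nq nr i0 := by omega
        have hmin2 : min (pvBnd nq nr (i0 + 1) - pvBnd nq nr i0) (m + 1 - pvBnd nq nr i0)
            = m + 1 - pvBnd nq nr i0 := by omega
        rw [hmin1, hmin2, show m + 1 - pvBnd nq nr i0 = (m - pvBnd nq nr i0) + 1 by omega,
          List.take_add_one, List.getElem?_drop,
          show pvBnd nq nr i0 + (m - pvBnd nq nr i0) = m from by omega,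
          List.getElem?_eq_getElem hm]
        simp
      · rw [if_neg hji]
        congr 1
        rcases Nat.lt_or_ge j i0 with hlt | hge
        · have h1 : pvBnd nq nr (j + 1) ≤ pvBnd nq nr i0 := pvBnd_mono nq nr hlt
          have h2 : pvBnd nq nr j ≤ pvBnd nq nr (j + 1) := pvBnd_mono nq nr (by omega)
          omega
        · have hgt : i0 + 1 ≤ j := by omega
          have h1 : pvBnd nq nr (i0 + 1) ≤ pvBnd nq nr j := pvBnd_mono nq nr hgt
          omega
-- A's loop with running start equals the closed-form slices (proved on the Int side).
theorem split_loop (lst : List Int) (k q r : Int) :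
    ∀ (m : Nat) (a : Int) (acc : List (List Int)), a + (m : Int) = k →
      ((PySem.List.pyRange a k 1).foldl
        (fun (st : List (List Int) × Int) i =>
          (st.1 ++ [PySem.List.slice lst (some st.2)
              (some (st.2 + (q + (if i < r then 1 else 0))))],
           st.2 + (q + (if i < r then 1 else 0))))
        (acc, a * q + min a r)).1
      = acc ++ (PySem.List.pyRange a k 1).map
          (fun i => PySem.List.slice lst (some (i * q + min i r))
              (some ((i + 1) * q + min (i + 1) r))) := by
  intro m
  induction m with
  | zero =>
    intro a acc h
    rw [PySem.List.pyRange_one_eq_nil (by omega)]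
    simp
  | succ m ih =>
    intro a acc h
    rw [PySem.List.pyRange_one_cons (by omega)]
    simp only [List.foldl_cons, List.map_cons]
    have hb : a * q + min a r + (q + (if a < r then 1 else 0)) = (a + 1) * q + min (a + 1) r := by
      have h1 : (a + 1) * q = a * q + q := by ring
      rw [h1]; split_ifs with hc <;> omega
    rw [hb, ih (a + 1) _ (by omega)]
    simp

-- A equals the canonical chunks (positive k).
theorem portA_eq_chunks (lst : List Int) (k : Int) (hk : 0 < k) :
    split_into_sublists lst k
      = pvChunks lst (PySem.Int.floordiv lst.length k).toNat
                     (PySem.Int.mod lst.length k).toNat k.toNat := by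
  obtain ⟨nk, rfl⟩ : ∃ m : Nat, k = (m : Int) := ⟨k.toNat, by omega⟩
  have hq0 : 0 ≤ PySem.Int.floordiv (lst.length : Int) (nk : Int) := by
    rw [PySem.Int.floordiv_eq_ediv_of_pos hk]
    exact Int.ediv_nonneg (Int.natCast_nonneg _) (le_of_lt hk)
  have hr0 : 0 ≤ PySem.Int.mod (lst.length : Int) (nk : Int) := PySem.Int.mod_nonneg _ hk
  obtain ⟨nq, hnq⟩ : ∃ m : Nat, PySem.Int.floordiv (lst.length : Int) (nk : Int) = (m : Int) :=
    ⟨_, (Int.toNat_of_nonneg hq0).symm⟩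
  obtain ⟨nr, hnr⟩ : ∃ m : Nat, PySem.Int.mod (lst.length : Int) (nk : Int) = (m : Int) :=
    ⟨_, (Int.toNat_of_nonneg hr0).symm⟩
  unfold split_into_sublists
  have H := split_loop lst (nk : Int) (PySem.Int.floordiv (lst.length : Int) (nk : Int))
    (PySem.Int.mod (lst.length : Int) (nk : Int)) nk 0 [] (by omega)
  rw [show (0 : Int) * PySem.Int.floordiv (lst.length : Int) (nk : Int)
      + min 0 (PySem.Int.mod (lst.length : Int) (nk : Int)) = 0 by omega] at H
  simp only []
  rw [H, hnq, hnr, PySem.List.pyRange_zero_natCast]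
  unfold pvChunks
  rw [List.map_map]
  simp only [Int.toNat_natCast]
  apply List.map_congr_left
  intro i hi
  simp only [Function.comp]
  have h1 : ((i : Int) * (nq : Int) + min (i : Int) (nr : Int)) = ((pvBnd nq nr i : Nat) : Int) := by
    unfold pvBnd; push_cast; ring
  have h2 : (((i : Int) + 1) * (nq : Int) + min ((i : Int) + 1) (nr : Int))
      = ((pvBnd nq nr (i + 1) : Nat) : Int) := by
    unfold pvBnd; push_cast; ring
  rw [h1, h2, PySem.List.slice_natCast]

-- B equals the canonical chunks (positive k).
theorem portB_eq_chunks (lst : List Int) (k : Int) (hk : 0 < k) :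
    split_into_sublists_alt lst k
      = pvChunks lst (PySem.Int.floordiv lst.length k).toNat
                     (PySem.Int.mod lst.length k).toNat k.toNat := by
  obtain ⟨nk, rfl⟩ : ∃ m : Nat, k = (m : Int) := ⟨k.toNat, by omega⟩
  have hq0 : 0 ≤ PySem.Int.floordiv (lst.length : Int) (nk : Int) := by
    rw [PySem.Int.floordiv_eq_ediv_of_pos hk]
    exact Int.ediv_nonneg (Int.natCast_nonneg _) (le_of_lt hk)
  have hr0 : 0 ≤ PySem.Int.mod (lst.length : Int) (nk : Int) := PySem.Int.mod_nonneg _ hk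
  obtain ⟨nq, hnq⟩ : ∃ m : Nat, PySem.Int.floordiv (lst.length : Int) (nk : Int) = (m : Int) :=
    ⟨_, (Int.toNat_of_nonneg hq0).symm⟩
  obtain ⟨nr, hnr⟩ : ∃ m : Nat, PySem.Int.mod (lst.length : Int) (nk : Int) = (m : Int) :=
    ⟨_, (Int.toNat_of_nonneg hr0).symm⟩
  have hlen : lst.length = nq * nk + nr := by
    have H := PySem.Int.floordiv_mul_add_mod (lst.length : Int) (nk : Int)
    rw [hnq, hnr] at H
    exact_mod_cast H.symm
  have hrk : nr < nk := by
    have H := PySem.Int.mod_lt (lst.length : Int) hk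
    rw [hnr] at H
    exact_mod_cast H
  unfold split_into_sublists_alt
  simp only []
  rw [hnq, hnr, PySem.List.pyRange_zero_natCast, List.map_map]
  have H := scatter_loop lst nq nr nk hlen hrk lst.length (le_refl _)
  rw [List.take_length] at H
  simp only [Function.comp_def]
  rw [H]
  unfold pvChunks
  apply List.map_congr_left
  intro i hi
  simp only [List.mem_range] at hi
  have h1 : pvBnd nq nr (i + 1) ≤ pvBnd nq nr nk := pvBnd_mono nq nr (by omega)
  have h2 : pvBnd nq nr nk = lst.length := by
    unfold pvBnd; rw [hlen]
    have hmin : min nk nr = nr := by omega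
    have hco : nk * nq = nq * nk := Nat.mul_comm nk nq
    omega
  simp only [Int.toNat_natCast]
  congr 1
  omega

-- ===== VERDICT (by name: the statement is the Claim_ definition above) =====
theorem split_into_sublists_spec : Claim_equal_split_into_sublists := by
  intro lst k _ hk
  unfold Spec_split_into_sublists
  rcases hk with hk | ⟨hnil, hneg⟩
  · rw [portA_eq_chunks lst k hk, portB_eq_chunks lst k hk]
  · subst hnil
    unfold split_into_sublists split_into_sublists_alt
    rw [PySem.List.pyRange_one_eq_nil (by omega)]
    simp [PySem.List.enumerate]
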